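-- pv_equiv track=rewrite | github.com/zstudent/HomeWorks | Algorithms for DNA Sequencing 1/assignment_6.py | naive_2mm
-- ===== SOURCE A (Python) =====
-- def naive_2mm(p, t):
--     occurrences = []
--     for i in range(len(t) - len(p) + 1):  # loop over alignments
--         mismatches = 0
--         for j in range(len(p)):
--             if t[i + j] != p[j]:
--                 mismatches += 1
--                 if mismatches > 2:
--                     break
--         if mismatches <= 2:
--             occurrences.append(i)
--             break
--     return occurrences
-- ===== SOURCE B (Python) =====
-- def naive_2mm(p, t):
--     # Column-wise mismatch tally: one pass per pattern position over all
--     # alignments at once, then pick the first alignment with <= 2 mismatches.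
--     counts = [0] * (len(t) - len(p) + 1)
--     for j, pc in enumerate(p):
--         counts = [c + (tc != pc) for c, tc in zip(counts, t[j:])]
--     for i, c in enumerate(counts):
--         if c <= 2:
--             return [i]
--     return []
-- ===== Notes on version B (the rewrite author's own statement) =====
-- stated objective: alternative
-- what changed: A scans each alignment's pattern positions with a capped mismatch counter and breaks; B tallies mismatches column-wise (one zip pass per pattern position over all alignments at once) and then scans the tally once for the first alignment with <= 2 mismatches.
import Mathlib
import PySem

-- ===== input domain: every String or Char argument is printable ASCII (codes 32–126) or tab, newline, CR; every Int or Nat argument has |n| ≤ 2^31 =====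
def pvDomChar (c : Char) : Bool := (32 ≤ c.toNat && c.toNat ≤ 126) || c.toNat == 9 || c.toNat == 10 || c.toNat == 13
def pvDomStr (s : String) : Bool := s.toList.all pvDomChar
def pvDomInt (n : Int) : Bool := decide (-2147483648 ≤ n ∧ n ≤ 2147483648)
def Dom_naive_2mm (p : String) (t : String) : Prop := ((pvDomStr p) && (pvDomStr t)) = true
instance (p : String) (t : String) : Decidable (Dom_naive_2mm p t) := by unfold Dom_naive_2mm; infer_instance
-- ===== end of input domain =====

-- B replaces A's per-alignment scan with a column-wise mismatch tally (one pass per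
-- pattern position over all alignments) followed by a single scan for the first
-- alignment with ≤ 2 mismatches; objective: alternative traversal, same exact result.

-- ===== PORT A =====
-- inner loop: 'for j in range(len(p))' with the mismatch counter and the break at > 2;
-- the remaining iteration count len(p)-j is the structural fuel, j the loop variable
-- (indexing is via PySem.List.pyGetD with a default; the proofs show every access is in range)
def naiveInnerGo (tl pl : List Char) (i : Nat) : Nat → Nat → Nat → Nat
  | 0, _, mism => mism
  | fuel + 1, j, mism =>
    if PySem.List.pyGetD tl ((i + j : Nat) : Int) ' ' ≠ PySem.List.pyGetD pl ((j : Nat) : Int) ' ' then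
      if mism + 1 > 2 then mism + 1
      else naiveInnerGo tl pl i fuel (j + 1) (mism + 1)
    else naiveInnerGo tl pl i fuel (j + 1) mism

-- outer loop: 'for i in range(len(t) - len(p) + 1)'; A appends i and breaks, so at most one offset
def naiveOuterGo (tl pl : List Char) : Nat → Nat → List Int
  | 0, _ => []
  | fuel + 1, i =>
    if naiveInnerGo tl pl i pl.length 0 0 ≤ 2 then [(i : Int)]
    else naiveOuterGo tl pl fuel (i + 1)

def naive_2mm (p : String) (t : String) : List Int :=
  naiveOuterGo t.toList p.toList (t.toList.length + 1 - p.toList.length) 0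

-- ===== PORT B =====
-- 'for i, c in enumerate(counts): if c <= 2: return [i]' / final 'return []'
def altFind (cs : List Int) (i : Nat) : List Int :=
  match cs with
  | [] => []
  | c :: rest => if c ≤ 2 then [(i : Int)] else altFind rest (i + 1)

def naive_2mm_alt (p : String) (t : String) : List Int :=
  let tl := t.toList
  let pl := p.toList
  -- counts = [0] * (len(t) - len(p) + 1)  (Python: a non-positive count yields [])
  -- for j, pc in enumerate(p): counts = [c + (tc != pc) for c, tc in zip(counts, t[j:])]
  let counts := (PySem.List.enumerate pl 0).foldl
    (fun cs jp =>
      (cs.zip (PySem.List.slice tl (some jp.1) none)).map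
        (fun x => x.1 + (if x.2 ≠ jp.2 then (1 : Int) else 0)))
    (List.replicate (((tl.length : Int) - (pl.length : Int) + 1).toNat) (0 : Int))
  altFind counts 0

-- ===== PRECONDITION & SPEC =====
def Spec_naive_2mm (p : String) (t : String) (out : List Int) : Prop := out = naive_2mm_alt p t
instance (p : String) (t : String) (out : List Int) : Decidable (Spec_naive_2mm p t out) := by unfold Spec_naive_2mm; infer_instance

-- ===== CLAIM (what is proved, stated in full; the proofs are below) =====
def Claim_equal_naive_2mm : Prop := ∀ (p : String) (t : String), Dom_naive_2mm p t → Spec_naive_2mm p t (naive_2mm p t)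

-- ===== LEMMAS AND PROOFS =====

-- mismatch count of the pattern suffix pl' aligned at text offset off
def hamL (tl : List Char) : List Char → Nat → Nat
  | [], _ => 0
  | pc :: rest, off => (if tl.getD off ' ' ≠ pc then 1 else 0) + hamL tl rest (off + 1)

-- A's capped inner counter stays ≤ 2 exactly when the full mismatch count does
lemma inner_iff (tl pl : List Char) (i : Nat) :
    ∀ fuel j m, fuel = pl.length - j →
      (naiveInnerGo tl pl i fuel j m ≤ 2 ↔ m + hamL tl (pl.drop j) (i + j) ≤ 2) := by
  intro fuel
  induction fuel generalizing i with
  | zero =>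
    intro j m hf
    simp [naiveInnerGo, List.drop_eq_nil_of_le (by omega : pl.length ≤ j), hamL]
  | succ f ih =>
    intro j m hf
    have hj : j < pl.length := by omega
    have hd : pl.drop j = pl[j] :: pl.drop (j + 1) := by
      rw [List.getElem_cons_drop]
    have hget : pl.getD j ' ' = pl[j] := List.getD_eq_getElem pl ' ' hj
    have hoff : i + (j + 1) = (i + j) + 1 := by omega
    rw [naiveInnerGo, hd]
    simp only [hamL, PySem.List.pyGetD_natCast, hget]
    by_cases hmm : tl.getD (i + j) ' ' ≠ pl[j]
    · rw [if_pos hmm, if_pos hmm]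
      by_cases hm2 : m + 1 > 2
      · rw [if_pos hm2]
        constructor <;> intro <;> omega
      · rw [if_neg hm2, ih i (j + 1) (m + 1) (by omega), hoff]
        omega
    · rw [if_neg hmm, if_neg hmm, ih i (j + 1) m (by omega), hoff]
      omega

-- B's fold step, named for the lemmas
def altStep (tl : List Char) (cs : List Int) (jp : Int × Char) : List Int :=
  (cs.zip (PySem.List.slice tl (some jp.1) none)).map
    (fun x => x.1 + (if x.2 ≠ jp.2 then (1 : Int) else 0))

-- the column-wise fold adds to each slot exactly the mismatch count of its alignment
lemma foldB_spec (tl : List Char) :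
    ∀ (pl' : List Char) (s : Nat) (cs : List Int),
      (cs.length + s + pl'.length ≤ tl.length + 1 ∨ cs.length = 0) →
      ((PySem.List.enumerate pl' (s : Int)).foldl (altStep tl) cs).length = cs.length ∧
      ∀ k, k < cs.length →
        ((PySem.List.enumerate pl' (s : Int)).foldl (altStep tl) cs)[k]? =
          some (cs.getD k 0 + (hamL tl pl' (s + k) : Int)) := by
  intro pl'
  induction pl' with
  | nil =>
    intro s cs hlen
    refine ⟨by simp [PySem.List.enumerate], ?_⟩
    intro k hk
    simp [PySem.List.enumerate, hamL, List.getElem?_eq_getElem hk]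
  | cons pc rest ih =>
    intro s cs hlen
    rcases hlen with hlen | hlen
    case inr =>
      -- empty tally: every step maps the empty zip, nothing to show elementwise
      have hnil : cs = [] := List.length_eq_zero_iff.mp hlen
      subst hnil
      have hcast : ((s : Int) + 1) = (((s + 1 : Nat)) : Int) := by push_cast; ring
      have hstep0 : altStep tl [] ((s : Int), pc) = [] := by simp [altStep]
      rw [PySem.List.enumerate_cons, List.foldl_cons, hstep0, hcast]
      have := ih (s + 1) [] (Or.inr rfl)
      exact ⟨this.1, fun k hk => absurd hk (by simp)⟩
    have hlc : (pc :: rest).length = rest.length + 1 := List.length_cons ..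
    have hcs : cs.length + s ≤ tl.length := by omega
    rw [PySem.List.enumerate_cons]
    have hslice : PySem.List.slice tl (some (s : Int)) none = tl.drop s :=
      PySem.List.slice_from_natCast tl s
    have hlen' : (altStep tl cs ((s : Int), pc)).length = cs.length := by
      simp [altStep, hslice, List.length_zip]
      omega
    have hstep : ∀ k, k < cs.length →
        (altStep tl cs ((s : Int), pc)).getD k 0 =
          cs.getD k 0 + (if tl.getD (s + k) ' ' ≠ pc then (1 : Int) else 0) := by
      intro k hk
      have hk2 : k < (tl.drop s).length := by simp; omega
      have hkz : k < (cs.zip (tl.drop s)).length := by simp [List.length_zip]; omega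
      have hsk : s + k < tl.length := by omega
      simp only [altStep, hslice]
      rw [List.getD_eq_getElem _ _ (by simp [List.length_zip]; omega)]
      simp only [List.getElem_map, List.getElem_zip, List.getElem_drop]
      rw [List.getD_eq_getElem cs 0 hk, List.getD_eq_getElem tl ' ' hsk]
    have hcast : ((s : Int) + 1) = (((s + 1 : Nat)) : Int) := by push_cast; ring
    rw [List.foldl_cons, hcast]
    have ihp := ih (s + 1) (altStep tl cs ((s : Int), pc))
      (Or.inl (by rw [hlen']; omega))
    refine ⟨by rw [ihp.1, hlen'], ?_⟩
    intro k hk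
    have hoff : s + 1 + k = s + k + 1 := by omega
    rw [ihp.2 k (by omega), hstep k hk, hoff]
    congr 1
    simp only [hamL]
    by_cases hmm : tl.getD (s + k) ' ' ≠ pc
    · rw [if_pos hmm, if_pos hmm]; push_cast; ring
    · rw [if_neg hmm, if_neg hmm]; push_cast; ring

-- A's outer loop equals B's final scan over the tally
lemma outer_eq_find (tl pl : List Char) (counts : List Int)
    (hval : ∀ k, k < counts.length → counts.getD k 0 = (hamL tl pl k : Int)) :
    ∀ fuel i, fuel = counts.length - i →
      naiveOuterGo tl pl fuel i = altFind (counts.drop i) i := by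
  intro fuel
  induction fuel with
  | zero =>
    intro i hf
    simp [naiveOuterGo, List.drop_eq_nil_of_le (by omega : counts.length ≤ i), altFind]
  | succ f ih =>
    intro i hf
    have hik : i < counts.length := by omega
    have hd : counts.drop i = counts[i] :: counts.drop (i + 1) := by
      rw [List.getElem_cons_drop]
    have hci : counts[i] = (hamL tl pl i : Int) := by
      rw [← List.getD_eq_getElem counts 0 hik, hval i hik]
    have hinner : naiveInnerGo tl pl i pl.length 0 0 ≤ 2 ↔ hamL tl pl i ≤ 2 := by
      have := inner_iff tl pl i pl.length 0 0 (by omega)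
      simpa using this
    rw [naiveOuterGo, hd]
    simp only [altFind, hci]
    by_cases hle : hamL tl pl i ≤ 2
    · rw [if_pos (hinner.mpr hle),
          if_pos (by exact_mod_cast hle : (hamL tl pl i : Int) ≤ 2)]
    · rw [if_neg (fun hc => hle (hinner.mp hc)),
          if_neg (by exact_mod_cast hle : ¬ ((hamL tl pl i : Int) ≤ 2))]
      exact ih (i + 1) (by omega)

-- ===== VERDICT (by name: the statement is the Claim_ definition above) =====
theorem naive_2mm_spec : Claim_equal_naive_2mm := by
  intro p t _
  unfold Spec_naive_2mm naive_2mm naive_2mm_alt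
  set tl := t.toList
  set pl := p.toList
  have hgen : ∀ (a b : Nat), (((a : Int)) - (b : Int) + 1).toNat = a + 1 - b := by
    intro a b; omega
  have hL : (((tl.length : Int) - (pl.length : Int) + 1).toNat) = tl.length + 1 - pl.length :=
    hgen tl.length pl.length
  set cs0 := List.replicate (((tl.length : Int) - (pl.length : Int) + 1).toNat) (0 : Int) with hcs0
  have hlen0 : cs0.length = tl.length + 1 - pl.length := by
    simp [hcs0, hL]
  have hspec := foldB_spec tl pl 0 cs0 (by
    by_cases hc : pl.length ≤ tl.length + 1
    · exact Or.inl (by rw [hlen0]; omega)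
    · exact Or.inr (by rw [hlen0]; omega))
  simp only [Nat.cast_zero] at hspec
  set counts := (PySem.List.enumerate pl (0 : Int)).foldl (altStep tl) cs0 with hcounts
  have hclen : counts.length = tl.length + 1 - pl.length := by rw [hcounts, hspec.1, hlen0]
  have hcval : ∀ k, k < counts.length → counts.getD k 0 = (hamL tl pl k : Int) := by
    intro k hk
    have hk0 : k < cs0.length := by omega
    have h1 := hspec.2 k hk0
    rw [List.getElem?_eq_getElem hk] at h1
    have h0 : cs0.getD k 0 = 0 := by simp [hcs0]
    rw [h0] at h1
    rw [List.getD_eq_getElem counts 0 hk]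
    simpa using h1
  have hfin := outer_eq_find tl pl counts hcval (tl.length + 1 - pl.length) 0 (by omega)
  rw [List.drop_zero] at hfin
  exact hfin
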